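-- pv_equiv track=rewrite | github.com/PmasonFF/Zooniverse-data-digging | Line Transcription and ALICE/flatten_and_aggregate_from_export_generic.py | common_finish
-- ===== SOURCE A (Python) =====
-- def common_finish(sa, sb):
--     def _iter():
--         for a, b in zip(sa[::-1], sb[::-1]):
--             if a == b:
--                 yield a
--             else:
--                 return
--
--     finish = ''.join(_iter())[::-1]
--     return len(finish), finish
-- ===== SOURCE B (Python) =====
-- def common_finish(sa, sb):
--     m = min(len(sa), len(sb))
--     count = 0
--     i = 1
--     while i <= m and sa[-i] == sb[-i]:
--         count += 1
--         i += 1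
--     finish = sa[len(sa) - count:]
--     return count, finish
-- ===== Notes on version B (the rewrite author's own statement) =====
-- stated objective: simpler
-- what changed: B walks an index from the end maintaining only an integer counter and takes one final slice of sa, instead of reversing both strings, zipping them through a generator and re-reversing the joined result.
import Mathlib
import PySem

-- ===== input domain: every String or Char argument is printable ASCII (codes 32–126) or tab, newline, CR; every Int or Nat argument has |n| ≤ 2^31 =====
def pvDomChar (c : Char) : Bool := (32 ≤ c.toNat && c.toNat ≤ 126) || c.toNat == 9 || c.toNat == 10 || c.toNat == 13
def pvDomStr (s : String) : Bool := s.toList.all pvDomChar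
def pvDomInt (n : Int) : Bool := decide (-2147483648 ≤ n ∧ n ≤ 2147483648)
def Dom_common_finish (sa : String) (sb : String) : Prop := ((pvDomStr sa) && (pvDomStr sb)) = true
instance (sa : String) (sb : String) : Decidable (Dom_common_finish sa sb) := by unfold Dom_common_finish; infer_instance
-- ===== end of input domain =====

-- B keeps only an integer counter while scanning from the end and takes one final slice,
-- instead of reversing both strings, zipping, joining and re-reversing (objective: simpler).


-- ===== PORT A =====
-- the generator `_iter`: walks zip(sa[::-1], sb[::-1]) yielding chars while equal, stops at first mismatch
def aIter : List Char → List Char → List Char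
  | a :: as, b :: bs => if a == b then a :: aIter as bs else []
  | _, _ => []

def common_finish (sa : String) (sb : String) : Int × String :=
  -- sa[::-1] is the reversed string (PySem.List.slice with step -1 = reverse); join of the yielded chars, reversed back
  let finish := (aIter sa.toList.reverse sb.toList.reverse).reverse
  ((finish.length : Int), String.ofList finish)

-- ===== PORT B =====
-- the while loop: i from 1 while i <= m and sa[-i] == sb[-i]; sa[-i] is sa[len(sa)-i] (both in range while i ≤ m)
def bLoop (la lb : List Char) (i count : Nat) : Nat :=
  if i ≤ min la.length lb.length then
    if la[la.length - i]? == lb[lb.length - i]? then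
      bLoop la lb (i + 1) (count + 1)
    else count
  else count
termination_by min la.length lb.length + 1 - i

def common_finish_alt (sa : String) (sb : String) : Int × String :=
  let la := sa.toList
  let count := bLoop la sb.toList 1 0
  -- finish = sa[len(sa)-count:]
  ((count : Int), String.ofList (la.drop (la.length - count)))

-- ===== PRECONDITION & SPEC =====
def Spec_common_finish (sa : String) (sb : String) (out : Int × String) : Prop := out = common_finish_alt sa sb
instance (sa : String) (sb : String) (out : Int × String) : Decidable (Spec_common_finish sa sb out) := by unfold Spec_common_finish; infer_instance

-- ===== CLAIM (what is proved, stated in full; the proofs are below) =====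
def Claim_equal_common_finish : Prop := ∀ (sa : String) (sb : String), Dom_common_finish sa sb → Spec_common_finish sa sb (common_finish sa sb)

-- ===== LEMMAS AND PROOFS =====

-- common-prefix length of two lists
def cpl : List Char → List Char → Nat
  | a :: as, b :: bs => if a == b then cpl as bs + 1 else 0
  | _, _ => 0

theorem cpl_le_left : ∀ (xs ys : List Char), cpl xs ys ≤ xs.length := by
  intro xs
  induction xs with
  | nil => intro ys; cases ys <;> simp [cpl]
  | cons a as ih =>
    intro ys
    cases ys with
    | nil => simp [cpl]
    | cons b bs =>
      simp only [cpl]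
      split
      · simpa using Nat.succ_le_succ (ih bs)
      · simp

theorem aIter_eq_take : ∀ (xs ys : List Char), aIter xs ys = xs.take (cpl xs ys) := by
  intro xs
  induction xs with
  | nil => intro ys; cases ys <;> simp [aIter, cpl]
  | cons a as ih =>
    intro ys
    cases ys with
    | nil => simp [aIter, cpl]
    | cons b bs =>
      simp only [aIter, cpl]
      split
      · simp [ih bs]
      · simp

theorem cpl_nil_right : ∀ (xs : List Char), cpl xs [] = 0 := by
  intro xs; cases xs <;> simp [cpl]

theorem bLoop_eq (la lb : List Char) : ∀ (k j count : Nat), min la.length lb.length - j ≤ k →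
    bLoop la lb (j + 1) count = count + cpl (la.reverse.drop j) (lb.reverse.drop j) := by
  intro k
  induction k with
  | zero =>
    intro j count h
    rw [bLoop]
    have hcond : ¬ (j + 1 ≤ min la.length lb.length) := by omega
    simp only [hcond, if_false]
    rcases le_or_gt la.length j with hla | hla
    · rw [List.drop_eq_nil_of_le (by simpa using hla)]
      simp [cpl]
    · have hlb : lb.length ≤ j := by omega
      rw [List.drop_eq_nil_of_le (show lb.reverse.length ≤ j by simpa using hlb)]
      simp [cpl_nil_right]
  | succ k ih =>
    intro j count h
    by_cases hj : j < min la.length lb.length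
    · have hja : j < la.length := by omega
      have hjb : j < lb.length := by omega
      have hja' : j < la.reverse.length := by simpa using hja
      have hjb' : j < lb.reverse.length := by simpa using hjb
      have hia : la.length - 1 - j < la.length := by omega
      have hib : lb.length - 1 - j < lb.length := by omega
      rw [bLoop]
      have hcond : j + 1 ≤ min la.length lb.length := by omega
      simp only [hcond, if_true]
      have ea : la[la.length - (j + 1)]? = some (la[la.length - 1 - j]'hia) := by
        rw [show la.length - (j + 1) = la.length - 1 - j by omega]
        exact List.getElem?_eq_getElem hia
      have eb : lb[lb.length - (j + 1)]? = some (lb[lb.length - 1 - j]'hib) := by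
        rw [show lb.length - (j + 1) = lb.length - 1 - j by omega]
        exact List.getElem?_eq_getElem hib
      have da : la.reverse.drop j = (la[la.length - 1 - j]'hia) :: la.reverse.drop (j + 1) := by
        rw [List.drop_eq_getElem_cons hja', List.getElem_reverse hja']
      have db : lb.reverse.drop j = (lb[lb.length - 1 - j]'hib) :: lb.reverse.drop (j + 1) := by
        rw [List.drop_eq_getElem_cons hjb', List.getElem_reverse hjb']
      rw [ea, eb, da, db, Option.some_beq_some]
      simp only [cpl]
      by_cases hxy : la[la.length - 1 - j]'hia = lb[lb.length - 1 - j]'hib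
      · simp only [hxy, beq_self_eq_true, if_true]
        rw [ih (j + 1) (count + 1) (by omega)]
        omega
      · have hbeq : ((la[la.length - 1 - j]'hia) == (lb[lb.length - 1 - j]'hib)) = false := by
          simp [hxy]
        simp [hbeq]
    · rw [bLoop]
      have hcond : ¬ (j + 1 ≤ min la.length lb.length) := by omega
      simp only [hcond, if_false]
      rcases le_or_gt la.length j with hla | hla
      · rw [List.drop_eq_nil_of_le (by simpa using hla)]
        simp [cpl]
      · have hlb : lb.length ≤ j := by omega
        rw [List.drop_eq_nil_of_le (show lb.reverse.length ≤ j by simpa using hlb)]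
        simp [cpl_nil_right]

theorem bLoop_start (la lb : List Char) : bLoop la lb 1 0 = cpl la.reverse lb.reverse := by
  simpa using bLoop_eq la lb (min la.length lb.length) 0 0 (by omega)

theorem common_finish_spec : Claim_equal_common_finish := by
  intro sa sb _
  unfold Spec_common_finish
  simp only [common_finish, common_finish_alt, bLoop_start, aIter_eq_take]
  have hcle : cpl sa.toList.reverse sb.toList.reverse ≤ sa.toList.length := by
    simpa using cpl_le_left sa.toList.reverse sb.toList.reverse
  have hrev : (sa.toList.reverse.take (cpl sa.toList.reverse sb.toList.reverse)).reverse =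
      sa.toList.drop (sa.toList.length - cpl sa.toList.reverse sb.toList.reverse) := by
    rw [List.reverse_take]
    simp
  rw [hrev]
  have hlen : (sa.toList.drop (sa.toList.length - cpl sa.toList.reverse sb.toList.reverse)).length =
      cpl sa.toList.reverse sb.toList.reverse := by
    rw [List.length_drop]
    omega
  rw [hlen]
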